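-- pv_equiv track=rewrite | github.com/navidmdn/identity_embedding | src/identity_meaning.py | build_restricted_target_dataset
-- ===== SOURCE A (Python) =====
-- def build_restricted_target_dataset(bios, vocab, in_domain):
--     test_ds = []
--
--     for bio in bios:
--         for idx, pi in enumerate(bio):
--             if pi in vocab:
--                 remaining = [x for x in bio if x != pi]
--
--                 # we want the remainig not to be available in vocab to test generalization
--                 if not in_domain:
--                     gen = True
--                     for rem in remaining:
--                         if rem in vocab:
--                             gen = False
--
--                     if not gen:
--                         continue
--
--                 remaining_ctxt = ', '.join(remaining)
--                 if len(remaining) == 0: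
--                     continue
--                 test_ds.append((remaining, remaining_ctxt, pi))
--
--     return test_ds
-- ===== SOURCE B (Python) =====
-- def build_restricted_target_dataset(bios, vocab, in_domain):
--     vocabset = set(vocab)
--     test_ds = []
--     for bio in bios:
--         # one pass: cache (remaining, joined context) per distinct vocab word of this bio
--         info = {}
--         for pi in bio:
--             if pi in vocabset and pi not in info:
--                 rem = [x for x in bio if x != pi]
--                 info[pi] = (rem, ', '.join(rem))
--         for pi in bio:
--             e = info.get(pi)
--             if e is None:
--                 continue
--             if not in_domain and any(k != pi for k in info):
--                 continue
--             rem, ctxt = e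
--             if rem:
--                 test_ds.append((rem, ctxt, pi))
--     return test_ds
-- ===== Notes on version B (the rewrite author's own statement) =====
-- stated objective: faster
-- what changed: vocab becomes a set (O(1) membership), and per bio the (remaining, joined-context) pair is computed once per distinct vocab word in a dict instead of per position, with the generalization test reduced to 'some other vocab word occurs in this bio' over the dict's keys instead of rescanning remaining against vocab
import Mathlib
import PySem

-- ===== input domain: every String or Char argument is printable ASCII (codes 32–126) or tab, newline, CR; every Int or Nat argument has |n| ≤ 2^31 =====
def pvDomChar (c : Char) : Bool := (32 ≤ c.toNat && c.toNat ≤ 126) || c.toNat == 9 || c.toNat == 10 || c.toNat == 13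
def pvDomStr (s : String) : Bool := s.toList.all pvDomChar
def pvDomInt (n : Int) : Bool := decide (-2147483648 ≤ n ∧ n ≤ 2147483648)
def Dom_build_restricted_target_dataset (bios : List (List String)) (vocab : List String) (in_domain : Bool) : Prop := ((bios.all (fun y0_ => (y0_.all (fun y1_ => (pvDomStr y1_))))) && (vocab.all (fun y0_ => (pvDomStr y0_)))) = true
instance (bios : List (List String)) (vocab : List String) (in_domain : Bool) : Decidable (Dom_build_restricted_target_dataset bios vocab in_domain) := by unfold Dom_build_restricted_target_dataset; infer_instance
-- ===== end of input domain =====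

-- B replaces A's per-position rescans by a per-bio dict caching (remaining, context) per distinct vocab word, plus a set for vocab membership (objective: faster).

-- ===== PORT A =====
-- body of A's inner loop (idx of enumerate is unused by A)
def pvStepA (vocab : List String) (bio : List String) (in_domain : Bool)
    (acc : List (List String × String × String)) (pi : String) : List (List String × String × String) :=
  if pi ∈ vocab then
    let remaining := bio.filter (fun x => x ≠ pi)
    let gen := remaining.foldl (fun g rem => if rem ∈ vocab then false else g) true
    if in_domain = false ∧ gen = false then acc
    else if remaining.length = 0 then acc
    else acc ++ [(remaining, PySem.Str.join ", " remaining, pi)]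
  else acc

def build_restricted_target_dataset (bios : List (List String)) (vocab : List String) (in_domain : Bool) : List (List String × String × String) :=
  bios.foldl (fun test_ds bio =>
    (PySem.List.enumerate bio).foldl (fun acc ip => pvStepA vocab bio in_domain acc ip.2) test_ds) []

-- ===== PORT B =====
-- first pass of B's per-bio loop: cache (remaining, joined context) per distinct vocab word
def pvInfoStep (vocabset : PySem.Set String) (bio : List String)
    (d : PySem.Dict String (List String × String)) (pi : String) : PySem.Dict String (List String × String) :=
  if pi ∈ vocabset ∧ d.contains pi = false then
    let rem := bio.filter (fun x => x ≠ pi)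
    d.insert pi (rem, PySem.Str.join ", " rem)
  else d

def pvBuildInfo (vocabset : PySem.Set String) (bio : List String) : PySem.Dict String (List String × String) :=
  bio.foldl (pvInfoStep vocabset bio) PySem.Dict.empty

-- body of B's second per-bio loop
def pvStepB (in_domain : Bool) (info : PySem.Dict String (List String × String))
    (acc : List (List String × String × String)) (pi : String) : List (List String × String × String) :=
  match info.get? pi with
  | none => acc
  | some (rem, ctxt) =>
    if in_domain = false ∧ info.keys.any (fun k => k ≠ pi) then acc
    else if rem.isEmpty then acc
    else acc ++ [(rem, ctxt, pi)]

def build_restricted_target_dataset_alt (bios : List (List String)) (vocab : List String) (in_domain : Bool) : List (List String × String × String) :=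
  let vocabset := PySem.Set.ofList vocab
  bios.foldl (fun test_ds bio =>
    let info := pvBuildInfo vocabset bio
    bio.foldl (pvStepB in_domain info) test_ds) []

-- ===== PRECONDITION & SPEC =====
def Spec_build_restricted_target_dataset (bios : List (List String)) (vocab : List String) (in_domain : Bool) (out : List (List String × String × String)) : Prop := out = build_restricted_target_dataset_alt bios vocab in_domain
instance (bios : List (List String)) (vocab : List String) (in_domain : Bool) (out : List (List String × String × String)) : Decidable (Spec_build_restricted_target_dataset bios vocab in_domain out) := by unfold Spec_build_restricted_target_dataset; infer_instance

-- ===== CLAIM (what is proved, stated in full; the proofs are below) =====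
def Claim_equal_build_restricted_target_dataset : Prop := ∀ (bios : List (List String)) (vocab : List String) (in_domain : Bool), Dom_build_restricted_target_dataset bios vocab in_domain → Spec_build_restricted_target_dataset bios vocab in_domain (build_restricted_target_dataset bios vocab in_domain)

-- ===== LEMMAS AND PROOFS =====

theorem pvEnumFold {α β : Type} (f : β → α → β) :
    ∀ (l : List α) (s : Int) (b : β),
      (PySem.List.enumerate l s).foldl (fun a p => f a p.2) b = l.foldl f b := by
  intro l
  induction l with
  | nil => intro s b; simp [PySem.List.enumerate_nil]
  | cons x xs ih => intro s b; rw [PySem.List.enumerate_cons]; simp [List.foldl_cons, ih]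

theorem pvGenFold (vocab : List String) :
    ∀ (l : List String) (b : Bool),
      l.foldl (fun g rem => if rem ∈ vocab then false else g) b
        = (b && !(l.any (fun r => decide (r ∈ vocab)))) := by
  intro l
  induction l with
  | nil => intro b; simp
  | cons x xs ih =>
    intro b
    simp only [List.foldl_cons, List.any_cons, ih]
    by_cases h : x ∈ vocab <;> simp [h]

theorem pvInfoAux (vs : PySem.Set String) (bio : List String) :
    ∀ (l : List String) (d : PySem.Dict String (List String × String)) (k : String),
      (l.foldl (pvInfoStep vs bio) d).get? k
        = if k ∈ l ∧ k ∈ vs ∧ d.get? k = none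
          then some (bio.filter (fun x => x ≠ k), PySem.Str.join ", " (bio.filter (fun x => x ≠ k)))
          else d.get? k := by
  intro l
  induction l with
  | nil => intro d k; simp
  | cons a l ih =>
    intro d k
    rw [List.foldl_cons, ih]
    by_cases ha : a ∈ vs ∧ d.contains a = false
    · have hstep : pvInfoStep vs bio d a
          = d.insert a (bio.filter (fun x => x ≠ a), PySem.Str.join ", " (bio.filter (fun x => x ≠ a))) := by
        simp [pvInfoStep, ha]
      have hdna : d.get? a = none := (PySem.Dict.get?_eq_none_iff_contains _ _).mpr ha.2
      by_cases hk : k = a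
      · subst hk
        rw [hstep, PySem.Dict.get?_insert_self]
        simp [ha.1, hdna]
      · rw [hstep, PySem.Dict.get?_insert_of_ne _ _ hk]
        simp [hk]
    · have hstep : pvInfoStep vs bio d a = d := by simp [pvInfoStep, ha]
      rw [hstep]
      by_cases hk : k = a
      · subst hk
        have : ¬ (k ∈ vs ∧ d.get? k = none) := by
          intro ⟨h1, h2⟩
          exact ha ⟨h1, (PySem.Dict.get?_eq_none_iff_contains _ _).mp h2⟩
        simp only [List.mem_cons]
        by_cases hkl : k ∈ l <;> simp [hkl] <;> tauto
      · simp [hk]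

theorem pvInfoGet (vs : PySem.Set String) (bio : List String) (k : String) :
    (pvBuildInfo vs bio).get? k
      = if k ∈ bio ∧ k ∈ vs
        then some (bio.filter (fun x => x ≠ k), PySem.Str.join ", " (bio.filter (fun x => x ≠ k)))
        else none := by
  unfold pvBuildInfo
  rw [pvInfoAux]
  simp [PySem.Dict.get?_empty]

theorem pvInfoKeys (vs : PySem.Set String) (bio : List String) (k : String) :
    k ∈ (pvBuildInfo vs bio).keys ↔ k ∈ bio ∧ k ∈ vs := by
  constructor
  · intro h
    by_contra hc
    have := pvInfoGet vs bio k
    rw [if_neg hc] at this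
    exact (((PySem.Dict.get?_eq_none_iff_not_mem_keys _ _).mp this)) h
  · intro h
    have := pvInfoGet vs bio k
    rw [if_pos h] at this
    by_contra hk
    rw [(PySem.Dict.get?_eq_none_iff_not_mem_keys _ _).mpr hk] at this
    simp at this

theorem pvStepEq (vocab : List String) (bio : List String) (in_domain : Bool)
    (acc : List (List String × String × String)) (pi : String) (hpi : pi ∈ bio) :
    pvStepA vocab bio in_domain acc pi
      = pvStepB in_domain (pvBuildInfo (PySem.Set.ofList vocab) bio) acc pi := by
  by_cases hv : pi ∈ vocab
  · have hvs : pi ∈ PySem.Set.ofList vocab := (PySem.Set.mem_ofList _ _).mpr hv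
    have hget := pvInfoGet (PySem.Set.ofList vocab) bio pi
    rw [if_pos ⟨hpi, hvs⟩] at hget
    have hany : (bio.filter (fun x => x ≠ pi)).any (fun r => decide (r ∈ vocab))
        = (pvBuildInfo (PySem.Set.ofList vocab) bio).keys.any (fun k => k ≠ pi) := by
      rw [Bool.eq_iff_iff]
      simp only [List.any_eq_true, List.mem_filter, decide_eq_true_eq]
      constructor
      · rintro ⟨r, ⟨hrb, hrne⟩, hrv⟩
        exact ⟨r, (pvInfoKeys _ _ r).mpr ⟨hrb, (PySem.Set.mem_ofList _ _).mpr hrv⟩, hrne⟩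
      · rintro ⟨k, hk, hkne⟩
        obtain ⟨hkb, hkv⟩ := (pvInfoKeys _ _ k).mp hk
        exact ⟨k, ⟨hkb, hkne⟩, (PySem.Set.mem_ofList _ _).mp hkv⟩
    unfold pvStepA pvStepB
    rw [hget]
    simp only [if_pos hv, pvGenFold, Bool.true_and]
    rw [hany]
    cases hA : (pvBuildInfo (PySem.Set.ofList vocab) bio).keys.any (fun k => k ≠ pi) <;>
      cases in_domain <;>
      simp
  · have hget := pvInfoGet (PySem.Set.ofList vocab) bio pi
    rw [if_neg (by intro h; exact hv ((PySem.Set.mem_ofList _ _).mp h.2))] at hget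
    unfold pvStepA pvStepB
    rw [hget]
    simp [hv]

-- ===== VERDICT (by name: the statement is the Claim_ definition above) =====
theorem build_restricted_target_dataset_spec : Claim_equal_build_restricted_target_dataset := by
  intro bios vocab in_domain _
  unfold Spec_build_restricted_target_dataset build_restricted_target_dataset build_restricted_target_dataset_alt
  apply PySem.List.foldl_congr_mem
  intro acc bio _
  rw [pvEnumFold (pvStepA vocab bio in_domain)]
  exact PySem.List.foldl_congr_mem _ _ _ _ (fun acc' pi hpi => pvStepEq vocab bio in_domain acc' pi hpi)
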